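-- pv_equiv track=rewrite | github.com/LeKwee/Data_Structure_and_Algorithms | Ways_to_remove_chocolate.py | removeChoc
-- ===== SOURCE A (Python) =====
-- counts = {
--         'count_removeChoc': 0,
--         'count_removeChoc_OPTIMISED':0
--         }
--
-- def removeChoc(n):
--     counts['count_removeChoc']+=1
--     if n == 3:
--         return 2
--     if n == 1:
--         return 1
--     if n < 0:
--         return 0
--     return removeChoc(n-1) + removeChoc(n-3)
-- ===== SOURCE B (Python) =====
-- def removeChoc(n):
--     if n < 0:
--         return 0
--     if n == 0:
--         return 0
--     if n == 1:
--         return 1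
--     if n == 2:
--         return 1
--     if n == 3:
--         return 2
--     a, b, c = 1, 1, 2
--     for _ in range(4, n + 1):
--         a, b, c = b, c, c + a
--     return c
-- ===== Notes on version B (the rewrite author's own statement) =====
-- stated objective: faster
-- what changed: Replaced A's exponential three-way recursion f(n)=f(n-1)+f(n-3) by a bottom-up loop carrying three rolling values; Pre_ excludes large n on which A's deep recursion does not return normally (recursion-limit RecursionError).
import Mathlib
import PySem

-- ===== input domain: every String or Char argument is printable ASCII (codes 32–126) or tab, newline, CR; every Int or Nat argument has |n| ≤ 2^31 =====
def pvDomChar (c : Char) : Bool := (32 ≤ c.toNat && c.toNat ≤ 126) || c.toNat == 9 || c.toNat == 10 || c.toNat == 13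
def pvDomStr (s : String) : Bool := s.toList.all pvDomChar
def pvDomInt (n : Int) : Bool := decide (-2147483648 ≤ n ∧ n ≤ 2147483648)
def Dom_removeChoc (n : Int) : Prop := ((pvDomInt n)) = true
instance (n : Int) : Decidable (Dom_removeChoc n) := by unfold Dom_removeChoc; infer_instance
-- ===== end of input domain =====

-- B replaces A's exponential three-way recursion by a bottom-up loop with three rolling
-- values (objective: faster, asymptotic). A also increments a global counter dict; the
-- equivalence proved here is about the return value only.

-- ===== PORT A =====
def removeChoc (n : Int) : Int :=
  if n = 3 then 2
  else if n = 1 then 1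
  else if n < 0 then 0
  else removeChoc (n - 1) + removeChoc (n - 3)
termination_by (n + 3).toNat
decreasing_by all_goals omega

-- ===== PORT B =====
-- the `for _ in range(4, n+1)` loop of Source B: it runs n-3 times over the rolling triple (a,b,c)
def removeChocLoop : Nat → Int × Int × Int → Int × Int × Int
  | 0, s => s
  | k + 1, (a, b, c) => removeChocLoop k (b, c, c + a)

def removeChoc_alt (n : Int) : Int :=
  if n < 0 then 0
  else if n = 0 then 0
  else if n = 1 then 1
  else if n = 2 then 1
  else if n = 3 then 2
  else (removeChocLoop (n - 3).toNat (1, 1, 2)).2.2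

-- ===== PRECONDITION & SPEC =====
-- Pre_ excludes large n, on which Python A's recursion depth (~n) exceeds CPython's
-- recursion limit and A raises RecursionError; 900 is conservative because the exact
-- cutoff (~1000) depends on the caller's existing stack depth.
def Pre_removeChoc (n : Int) : Prop := n ≤ 900
instance (n : Int) : Decidable (Pre_removeChoc n) := by unfold Pre_removeChoc; infer_instance
def pvWitness_removeChoc : Int := 7

def Spec_removeChoc (n : Int) (out : Int) : Prop := out = removeChoc_alt n
instance (n : Int) (out : Int) : Decidable (Spec_removeChoc n out) := by unfold Spec_removeChoc; infer_instance

-- ===== CLAIM (what is proved, stated in full; the proofs are below) =====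
def Claim_equal_removeChoc : Prop := ∀ (n : Int), Dom_removeChoc n → Pre_removeChoc n → Spec_removeChoc n (removeChoc n)

-- ===== LEMMAS AND PROOFS =====

-- the common reference sequence: f(0)=0, f(1)=1, f(2)=1, f(3)=2, f(n)=f(n-1)+f(n-3)
def pvF : Nat → Int
  | 0 => 0
  | 1 => 1
  | 2 => 1
  | 3 => 2
  | k + 4 => pvF (k + 3) + pvF (k + 1)

theorem removeChoc_eq_pvF : ∀ (n : Int), removeChoc n = if n < 0 then 0 else pvF n.toNat := by
  intro n
  induction n using removeChoc.induct with
  | case1 => simp [removeChoc, pvF]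
  | case2 => simp [removeChoc, pvF]
  | case3 n h3 h1 hneg => simp [removeChoc, h3, h1, hneg]
  | case4 n h3 h1 hneg ih1 ih3 =>
    rw [removeChoc]; simp only [h3, h1, hneg, if_false]
    rw [ih1, ih3]
    rcases (by omega : n = 0 ∨ n = 2 ∨ 4 ≤ n) with h | h | h
    · subst h; rw [if_pos (by decide), if_pos (by decide)]; decide
    · subst h; rw [if_neg (by decide), if_pos (by decide)]; decide
    · obtain ⟨k, hk⟩ : ∃ k, n.toNat = k + 4 := ⟨n.toNat - 4, by omega⟩
      have h1' : (n - 1).toNat = k + 3 := by omega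
      have h3' : (n - 3).toNat = k + 1 := by omega
      rw [if_neg (by omega), if_neg (by omega), hk, h1', h3']
      rfl

theorem removeChocLoop_pvF : ∀ (k m : Nat),
    removeChocLoop k (pvF (m + 1), pvF (m + 2), pvF (m + 3))
      = (pvF (m + k + 1), pvF (m + k + 2), pvF (m + k + 3)) := by
  intro k
  induction k with
  | zero => intro m; rfl
  | succ k ih =>
    intro m
    have h4 : pvF (m + 3) + pvF (m + 1) = pvF (m + 4) := by rw [pvF]
    rw [removeChocLoop, h4]
    have := ih (m + 1)
    rw [show m + 1 + 1 = m + 2 by ring, show m + 1 + 2 = m + 3 by ring,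
        show m + 1 + 3 = m + 4 by ring] at this
    rw [this]
    congr 2 <;> · congr 1; omega

theorem removeChoc_alt_eq_pvF : ∀ (n : Int), removeChoc_alt n = if n < 0 then 0 else pvF n.toNat := by
  intro n
  unfold removeChoc_alt
  rcases lt_or_ge n 0 with h | h
  · simp [h]
  rw [if_neg (by omega)]
  rcases (by omega : n = 0 ∨ n = 1 ∨ n = 2 ∨ n = 3 ∨ 4 ≤ n) with h0 | h0 | h0 | h0 | h0
  all_goals try (subst h0; rfl)
  rw [if_neg (by omega), if_neg (by omega), if_neg (by omega), if_neg (by omega),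
      if_neg (by omega)]
  obtain ⟨k, hk⟩ : ∃ k, (n - 3).toNat = k := ⟨_, rfl⟩
  have hn : n.toNat = k + 3 := by omega
  rw [hk, hn]
  have := removeChocLoop_pvF k 0
  simp only [Nat.zero_add] at this
  rw [show ((1 : Int), (1 : Int), (2 : Int)) = (pvF 1, pvF 2, pvF 3) from rfl, this]

-- ===== VERDICT (by name: the statement is the Claim_ definition above) =====
theorem removeChoc_spec : Claim_equal_removeChoc := by
  intro n _ _
  unfold Spec_removeChoc
  rw [removeChoc_eq_pvF, removeChoc_alt_eq_pvF]
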